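-- pv_equiv track=rewrite | github.com/jungeun5-choi/algorithm | 프로그래머스/2/12951. JadenCase 문자열 만들기/JadenCase 문자열 만들기.py | solution
-- ===== SOURCE A (Python) =====
-- def solution(s):
--     words = s.split(' ')
--     answer = []
--     for chars in words:
--         if chars != '':
--             answer.append(chars[0].upper() + chars[1:].lower())
--         else:
--             answer.append('')
--     return " ".join(answer)
-- ===== SOURCE B (Python) =====
-- def solution(s):
--     out = []
--     new_word = True
--     for ch in s:
--         if ch == ' ':
--             out.append(ch)
--             new_word = True
--         elif new_word:
--             out.append(ch.upper())
--             new_word = False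
--         else:
--             out.append(ch.lower())
--     return ''.join(out)
-- ===== Notes on version B (the rewrite author's own statement) =====
-- stated objective: alternative
-- what changed: Replaces split-on-space + per-word capitalize + join with a single character scan carrying a new_word flag, never materializing the word list.
import Mathlib
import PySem

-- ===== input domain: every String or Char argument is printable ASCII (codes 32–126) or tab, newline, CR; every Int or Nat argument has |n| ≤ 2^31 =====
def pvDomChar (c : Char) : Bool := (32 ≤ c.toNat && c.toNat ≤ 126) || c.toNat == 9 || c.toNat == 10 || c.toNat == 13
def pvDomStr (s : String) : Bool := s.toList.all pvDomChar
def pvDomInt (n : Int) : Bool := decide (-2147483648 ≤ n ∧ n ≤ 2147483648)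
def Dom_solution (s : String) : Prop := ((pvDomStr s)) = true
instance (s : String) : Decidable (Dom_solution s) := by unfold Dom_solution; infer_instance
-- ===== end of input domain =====

-- B replaces split(' ') + per-word capitalization + join by a single character scan with a
-- new_word flag; same complexity, no word list materialized. Equivalence proved for all strings.

-- ===== PORT A =====
-- chars[0].upper() + chars[1:].lower() for a non-empty word, '' kept for empty pieces
def pvCapword (chars : List Char) : List Char :=
  if chars = [] then []                                  -- the 'else: append('')' branch
  else PySem.Chars.upper (chars.take 1) ++ PySem.Chars.lower (chars.drop 1)

def solution (s : String) : String :=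
  let words := PySem.Chars.splitOn s.toList [' ']       -- s.split(' ')
  let answer := words.foldl (fun acc chars => acc ++ [pvCapword chars]) []
  String.ofList (PySem.Chars.join [' '] answer)             -- " ".join(answer)

-- ===== PORT B =====
def solution_alt (s : String) : String :=
  let p := s.toList.foldl
    (fun (p : List Char × Bool) ch =>
      if ch = ' ' then (p.1 ++ [ch], true)
      else if p.2 then (p.1 ++ [PySem.Chars.upperChar ch], false)
      else (p.1 ++ [PySem.Chars.lowerChar ch], false))
    (([] : List Char), true)
  String.ofList p.1

-- ===== PRECONDITION & SPEC =====
def Spec_solution (s : String) (out : String) : Prop := out = solution_alt s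
instance (s : String) (out : String) : Decidable (Spec_solution s out) := by unfold Spec_solution; infer_instance

-- ===== CLAIM (what is proved, stated in full; the proofs are below) =====
def Claim_equal_solution : Prop := ∀ (s : String), Dom_solution s → Spec_solution s (solution s)

-- ===== LEMMAS AND PROOFS =====

-- B's scan as a structural recursion (flag, remaining chars)
def pvScan : Bool → List Char → List Char
  | _, [] => []
  | nw, c :: cs =>
    if c = ' ' then ' ' :: pvScan true cs
    else (if nw then PySem.Chars.upperChar c else PySem.Chars.lowerChar c) :: pvScan false cs

lemma pvScan_foldl (cs : List Char) : ∀ (acc : List Char) (nw : Bool),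
    (cs.foldl (fun (p : List Char × Bool) ch =>
      if ch = ' ' then (p.1 ++ [ch], true)
      else if p.2 then (p.1 ++ [PySem.Chars.upperChar ch], false)
      else (p.1 ++ [PySem.Chars.lowerChar ch], false)) (acc, nw)).1 = acc ++ pvScan nw cs := by
  induction cs with
  | nil => intro acc nw; simp [pvScan]
  | cons c cs ih =>
    intro acc nw
    by_cases hc : c = ' '
    · simp [List.foldl, hc, pvScan, ih]
    · cases nw <;> simp [List.foldl, hc, pvScan, ih]

-- A's split(' ') as a structural recursion: (first word, remaining words)
def pvSplit1 : List Char → List Char × List (List Char)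
  | [] => ([], [])
  | c :: cs =>
    let p := pvSplit1 cs
    if c = ' ' then ([], p.1 :: p.2) else (c :: p.1, p.2)

lemma pvGo_spec (fuel : Nat) : ∀ (l cur : List Char) (acc : List (List Char)), l.length < fuel →
    PySem.Chars.splitOn.go [' '] fuel l cur acc
      = acc.reverse ++ (cur.reverse ++ (pvSplit1 l).1) :: (pvSplit1 l).2 := by
  induction fuel with
  | zero => intro l cur acc h; omega
  | succ fuel ih =>
    intro l cur acc h
    cases l with
    | nil => simp [PySem.Chars.splitOn.go, pvSplit1]
    | cons c rest =>
      by_cases hc : c = ' '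
      · subst hc
        rw [show PySem.Chars.splitOn.go [' '] (fuel+1) (' ' :: rest) cur acc
              = PySem.Chars.splitOn.go [' '] fuel rest [] (cur.reverse :: acc) by
            simp [PySem.Chars.splitOn.go, List.isPrefixOf]]
        rw [ih rest [] (cur.reverse :: acc) (by simpa using Nat.lt_of_succ_lt_succ h)]
        simp [pvSplit1]
      · rw [show PySem.Chars.splitOn.go [' '] (fuel+1) (c :: rest) cur acc
              = PySem.Chars.splitOn.go [' '] fuel rest (c :: cur) acc by
            have hc' : ¬(' ' = c) := fun h => hc h.symm
            simp [PySem.Chars.splitOn.go, List.isPrefixOf, hc']]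
        rw [ih rest (c :: cur) acc (by simpa using Nat.lt_of_succ_lt_succ h)]
        simp [pvSplit1, hc]

lemma pvSplitOn_eq (cs : List Char) :
    PySem.Chars.splitOn cs [' '] = (pvSplit1 cs).1 :: (pvSplit1 cs).2 := by
  unfold PySem.Chars.splitOn
  rw [pvGo_spec (cs.length + 1) cs [] [] (by omega)]
  simp

-- ' ' prepended to each capitalized word (the join of the tail)
def pvTailJoin : List (List Char) → List Char
  | [] => []
  | w :: ws => ' ' :: (pvCapword w ++ pvTailJoin ws)

lemma pvJoin_eq (w : List Char) (ws : List (List Char)) :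
    PySem.Chars.join [' '] ((w :: ws).map pvCapword) = pvCapword w ++ pvTailJoin ws := by
  induction ws generalizing w with
  | nil => simp [PySem.Chars.join, pvTailJoin, List.intercalate]
  | cons v ws ih =>
    simp only [List.map_cons] at *
    rw [show PySem.Chars.join [' '] (pvCapword w :: pvCapword v :: ws.map pvCapword)
          = pvCapword w ++ [' '] ++ PySem.Chars.join [' '] (pvCapword v :: ws.map pvCapword) by
        simp [PySem.Chars.join, List.intercalate]]
    rw [ih v]
    simp [pvTailJoin]

-- the main invariant: the capitalized/lowered first word plus the joined tail is the scan
lemma pvMain (cs : List Char) :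
    (pvCapword (pvSplit1 cs).1 ++ pvTailJoin (pvSplit1 cs).2 = pvScan true cs)
    ∧ (PySem.Chars.lower (pvSplit1 cs).1 ++ pvTailJoin (pvSplit1 cs).2 = pvScan false cs) := by
  induction cs with
  | nil => simp [pvSplit1, pvCapword, pvTailJoin, pvScan, PySem.Chars.lower]
  | cons c cs ih =>
    obtain ⟨ih1, ih2⟩ := ih
    by_cases hc : c = ' '
    · subst hc
      have e : pvCapword ([] : List Char) = [] := by simp [pvCapword]
      constructor <;>
        simp [pvSplit1, pvTailJoin, pvScan, PySem.Chars.lower, e, ih1]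
    · have hne : (c :: (pvSplit1 cs).1) ≠ [] := List.cons_ne_nil _ _
      constructor
      · simp only [pvSplit1, if_neg hc, pvCapword, PySem.Chars.upper, PySem.Chars.lower] at *
        simp [pvScan, hc, ← ih2, hne]
      · simp only [pvSplit1, if_neg hc, PySem.Chars.lower] at *
        simp [pvScan, hc, ← ih2]

-- ===== VERDICT (by name: the statement is the Claim_ definition above) =====
theorem solution_spec : Claim_equal_solution := by
  intro s _
  unfold Spec_solution solution solution_alt
  simp only [pvSplitOn_eq, PySem.List.foldl_append_singleton_eq_map,
    pvScan_foldl s.toList [] true, List.nil_append]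
  rw [pvJoin_eq, (pvMain s.toList).1]
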